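-- pv_equiv track=rewrite | github.com/vcu-swim-lab/SE-Figurative-Language | RQ3/contrastive_learning.py | remove_block_quotes
-- ===== SOURCE A (Python) =====
-- def remove_block_quotes(text):
--     modified_text = ''
--     prev_line_block = False
--     for line in text.split('\n'):
--         if not line.strip().startswith('>'):
--             modified_text += line + '\n'
--             prev_line_block = False
--         else:
--             if prev_line_block is True:
--                 continue
--             else:
--                 modified_text += '[BLOCK QUOTE].' + '\n'
--                 prev_line_block = True
--     return modified_text
-- ===== SOURCE B (Python) =====
-- from itertools import groupby
--
-- def remove_block_quotes(text):
--     pieces = []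
--     for is_quote, group in groupby(text.split('\n'),
--                                    key=lambda line: line.strip().startswith('>')):
--         if is_quote:
--             pieces.append('[BLOCK QUOTE].\n')
--         else:
--             pieces.extend(line + '\n' for line in group)
--     return ''.join(pieces)
-- ===== Notes on version B (the rewrite author's own statement) =====
-- stated objective: idiomatic
-- what changed: Replaces the prev_line_block flag and string += accumulation with itertools.groupby over the split lines keyed by the block-quote test, emitting one placeholder per quote run and joining the pieces once.
import Mathlib
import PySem

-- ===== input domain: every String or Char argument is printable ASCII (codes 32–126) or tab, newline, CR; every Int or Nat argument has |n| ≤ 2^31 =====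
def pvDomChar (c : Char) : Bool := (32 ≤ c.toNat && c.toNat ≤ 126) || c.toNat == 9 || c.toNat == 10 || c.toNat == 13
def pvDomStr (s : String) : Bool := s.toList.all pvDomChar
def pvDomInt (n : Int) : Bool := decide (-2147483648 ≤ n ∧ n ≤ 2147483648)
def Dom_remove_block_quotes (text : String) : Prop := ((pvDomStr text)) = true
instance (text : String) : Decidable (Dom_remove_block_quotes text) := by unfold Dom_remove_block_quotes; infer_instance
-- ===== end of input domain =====

-- B collapses each maximal run of '>'-lines via grouping (itertools.groupby) instead of a prev-line flag; idiomatic, same cost.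
-- ===== PORT A =====
-- is this line a block-quote line?  (Python: line.strip().startswith('>'))
def pvIsQuote (line : List Char) : Bool := PySem.Chars.startswith (PySem.Chars.strip line) ['>']

-- A's loop state: (modified_text, prev_line_block)
def pvStepA (st : List Char × Bool) (line : List Char) : List Char × Bool :=
  if !pvIsQuote line then (st.1 ++ line ++ ['\n'], false)
  else if st.2 then st
  else (st.1 ++ "[BLOCK QUOTE].".toList ++ ['\n'], true)

def remove_block_quotes (text : String) : String :=
  String.ofList ((PySem.Chars.splitOn text.toList ['\n']).foldl pvStepA ([], false)).1

-- ===== PORT B =====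
-- itertools.groupby on the key pvIsQuote: maximal runs of lines with equal key
def pvGroupBy : List (List Char) → List (Bool × List (List Char))
  | [] => []
  | l :: ls =>
    match pvGroupBy ls with
    | [] => [(pvIsQuote l, [l])]
    | (k, g) :: rest =>
      if pvIsQuote l == k then (k, l :: g) :: rest
      else (pvIsQuote l, [l]) :: (k, g) :: rest

def remove_block_quotes_alt (text : String) : String :=
  String.ofList ((pvGroupBy (PySem.Chars.splitOn text.toList ['\n'])).flatMap fun kg =>
    if kg.1 then "[BLOCK QUOTE].".toList ++ ['\n']
    else kg.2.flatMap fun line => line ++ ['\n'])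

-- ===== PRECONDITION & SPEC =====
def Spec_remove_block_quotes (text : String) (out : String) : Prop := out = remove_block_quotes_alt text
instance (text : String) (out : String) : Decidable (Spec_remove_block_quotes text out) := by unfold Spec_remove_block_quotes; infer_instance

-- ===== CLAIM (what is proved, stated in full; the proofs are below) =====
def Claim_equal_remove_block_quotes : Prop := ∀ (text : String), Dom_remove_block_quotes text → Spec_remove_block_quotes text (remove_block_quotes text)

-- ===== LEMMAS AND PROOFS =====
-- A's loop, written as structural recursion producing the output front-to-back
def pvLoopA : List (List Char) → Bool → List Char
  | [], _ => []
  | l :: ls, prev =>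
    if !pvIsQuote l then l ++ '\n' :: pvLoopA ls false
    else if prev then pvLoopA ls prev
    else "[BLOCK QUOTE].".toList ++ '\n' :: pvLoopA ls true

lemma pvFoldA_eq (lines : List (List Char)) : ∀ (acc : List Char) (prev : Bool),
    (lines.foldl pvStepA (acc, prev)).1 = acc ++ pvLoopA lines prev := by
  induction lines with
  | nil => intro acc prev; simp [pvLoopA]
  | cons l ls ih =>
    intro acc prev
    simp only [List.foldl, pvStepA, pvLoopA]
    by_cases hq : pvIsQuote l
    · by_cases hp : prev
      · simp [hq, hp, ih]
      · simp [hq, hp, ih]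
    · simp [hq, ih]

-- the rendering of groups, with a flag suppressing a leading quote group
def pvRender (prev : Bool) : List (Bool × List (List Char)) → List Char
  | [] => []
  | (k, g) :: rest =>
    (if k then (if prev then [] else "[BLOCK QUOTE].".toList ++ ['\n'])
     else g.flatMap fun line => line ++ ['\n']) ++ pvRender false rest

lemma pvGroupBy_nil_iff (ls : List (List Char)) : pvGroupBy ls = [] ↔ ls = [] := by
  cases ls with
  | nil => simp [pvGroupBy]
  | cons l ls =>
    simp only [pvGroupBy]
    constructor
    · intro h
      cases hg : pvGroupBy ls with
      | nil => rw [hg] at h; simp at h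
      | cons p rest =>
        rw [hg] at h
        obtain ⟨k, g⟩ := p
        by_cases hk : pvIsQuote l == k <;> simp [hk] at h
    · intro h; cases h

lemma pvLoopA_render (lines : List (List Char)) : ∀ (prev : Bool),
    pvLoopA lines prev = pvRender prev (pvGroupBy lines) := by
  induction lines with
  | nil => intro prev; simp [pvLoopA, pvGroupBy, pvRender]
  | cons l ls ih =>
    intro prev
    cases hg : pvGroupBy ls with
    | nil =>
      have hls : ls = [] := (pvGroupBy_nil_iff ls).mp hg
      subst hls
      by_cases hq : pvIsQuote l
      · by_cases hp : prev <;>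
          simp [pvLoopA, pvGroupBy, pvRender, hq, hp]
      · simp [pvLoopA, pvGroupBy, pvRender, hq]
    | cons p rest =>
      obtain ⟨k, g⟩ := p
      by_cases hq : pvIsQuote l
      · by_cases hk : pvIsQuote l == k
        · have hkt : k = true := by rw [hq] at hk; exact (beq_iff_eq.mp hk).symm
          by_cases hp : prev
          · simp [pvLoopA, pvGroupBy, hg, hq, hp, pvRender, hkt, ih true]
          · simp [pvLoopA, pvGroupBy, hg, hq, hp, pvRender, hkt, ih true]
        · have hkf : k = false := by
            rw [hq] at hk
            cases k
            · rfl
            · simp at hk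
          by_cases hp : prev
          · simp [pvLoopA, pvGroupBy, hg, hq, hp, pvRender, hkf, ih true]
          · simp [pvLoopA, pvGroupBy, hg, hq, hp, pvRender, hkf, ih true]
      · have hq' : pvIsQuote l = false := by simpa using hq
        by_cases hk : pvIsQuote l == k
        · have hkf : k = false := by rw [hq'] at hk; exact (beq_iff_eq.mp hk).symm
          simp [pvLoopA, pvGroupBy, hg, hq', pvRender, hkf, ih false]
        · have hkt : k = true := by
            rw [hq'] at hk
            cases k
            · simp at hk
            · rfl
          simp [pvLoopA, pvGroupBy, hg, hq', pvRender, hkt, ih false]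

lemma pvRender_false (gs : List (Bool × List (List Char))) :
    pvRender false gs = gs.flatMap fun kg =>
      if kg.1 then "[BLOCK QUOTE].".toList ++ ['\n']
      else kg.2.flatMap fun line => line ++ ['\n'] := by
  induction gs with
  | nil => simp [pvRender]
  | cons p rest ih =>
    obtain ⟨k, g⟩ := p
    simp [pvRender, ih]

-- ===== VERDICT (by name: the statement is the Claim_ definition above) =====
theorem remove_block_quotes_spec : Claim_equal_remove_block_quotes := by
  intro text _
  unfold Spec_remove_block_quotes remove_block_quotes remove_block_quotes_alt
  rw [pvFoldA_eq, pvLoopA_render, pvRender_false]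
  simp
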